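-- pv_equiv track=rewrite | github.com/TechBrewDaily/techbrewdaily.github.io | generate-seo-blog.py | generate_seo_tags
-- ===== SOURCE A (Python) =====
-- def generate_seo_tags(title):
--     """Generate relevant SEO tags based on title content."""
--     tags = ["technology", "india", "tech-news", "innovation", "2025"]
--
--     title_lower = title.lower()
--
--     # AI and Machine Learning
--     if any(keyword in title_lower for keyword in ["ai", "artificial intelligence", "machine learning", "ml"]):
--         tags.extend(["ai", "artificial-intelligence", "machine-learning", "automation"])
--
--     # Startups and Business
--     if any(keyword in title_lower for keyword in ["startup", "business", "entrepreneur", "company"]):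
--         tags.extend(["startup", "entrepreneurship", "business", "funding"])
--
--     # Fintech and Finance
--     if any(keyword in title_lower for keyword in ["fintech", "finance", "banking", "payment"]):
--         tags.extend(["fintech", "finance", "banking", "digital-payments"])
--
--     # Mobile and Apps
--     if any(keyword in title_lower for keyword in ["mobile", "app", "android", "ios"]):
--         tags.extend(["mobile-apps", "android", "ios", "mobile-development"])
--
--     # Blockchain and Crypto
--     if any(keyword in title_lower for keyword in ["blockchain", "crypto", "web3", "bitcoin"]):
--         tags.extend(["blockchain", "cryptocurrency", "web3", "digital-currency"])
--
--     # Cloud and Infrastructure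
--     if any(keyword in title_lower for keyword in ["cloud", "aws", "azure", "infrastructure"]):
--         tags.extend(["cloud-computing", "infrastructure", "devops", "scalability"])
--
--     # Development and Programming
--     if any(keyword in title_lower for keyword in ["development", "programming", "code", "developer"]):
--         tags.extend(["software-development", "programming", "developer-tools", "coding"])
--
--     # Remove duplicates and limit to 10 tags
--     tags = list(dict.fromkeys(tags))[:10]
--     return tags
-- ===== SOURCE B (Python) =====
-- GROUPS = [
--     (("ai", "artificial intelligence", "machine learning", "ml"),
--      ["ai", "artificial-intelligence", "machine-learning", "automation"]),
--     (("startup", "business", "entrepreneur", "company"),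
--      ["startup", "entrepreneurship", "business", "funding"]),
--     (("fintech", "finance", "banking", "payment"),
--      ["fintech", "finance", "banking", "digital-payments"]),
--     (("mobile", "app", "android", "ios"),
--      ["mobile-apps", "android", "ios", "mobile-development"]),
--     (("blockchain", "crypto", "web3", "bitcoin"),
--      ["blockchain", "cryptocurrency", "web3", "digital-currency"]),
--     (("cloud", "aws", "azure", "infrastructure"),
--      ["cloud-computing", "infrastructure", "devops", "scalability"]),
--     (("development", "programming", "code", "developer"),
--      ["software-development", "programming", "developer-tools", "coding"]),
-- ]
--
--
-- def generate_seo_tags(title):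
--     """Generate SEO tags: base tags plus matched group tags, stopping at 10.
--
--     All 33 candidate tags are pairwise distinct, so A's dedup pass is a
--     no-op and the [:10] cut equals a budget of 5 tags beyond the base;
--     we therefore fill a 5-tag budget and stop early, never deduplicating.
--     """
--     title_lower = title.lower()
--     out = ["technology", "india", "tech-news", "innovation", "2025"]
--     budget = 5
--     for keywords, extra in GROUPS:
--         if budget == 0:
--             break
--         if any(k in title_lower for k in keywords):
--             chunk = extra[:budget]
--             out += chunk
--             budget -= len(chunk)
--     return out
-- ===== Notes on version B (the rewrite author's own statement) =====
-- stated objective: alternative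
-- what changed: B drops A's dedup-then-truncate entirely: since all 33 candidate tags are pairwise distinct, dedup is a no-op and [:10] equals a 5-tag budget beyond the base, so B fills a budget with early stopping and never builds the full list or deduplicates.
import Mathlib
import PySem

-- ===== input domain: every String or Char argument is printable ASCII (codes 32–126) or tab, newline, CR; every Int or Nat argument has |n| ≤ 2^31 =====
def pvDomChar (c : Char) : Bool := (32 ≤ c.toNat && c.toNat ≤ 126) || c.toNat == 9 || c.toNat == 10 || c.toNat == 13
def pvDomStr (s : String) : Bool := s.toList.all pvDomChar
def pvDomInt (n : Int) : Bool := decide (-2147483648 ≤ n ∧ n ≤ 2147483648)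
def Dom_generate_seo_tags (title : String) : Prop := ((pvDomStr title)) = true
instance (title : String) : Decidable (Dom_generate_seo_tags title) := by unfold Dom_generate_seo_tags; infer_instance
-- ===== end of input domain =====

-- B drops A's dedup-then-truncate: all 33 candidate tags are pairwise distinct, so
-- dedup is a no-op and [:10] equals a 5-tag budget beyond the base; B fills that
-- budget with early stopping. Objective: alternative (same cost, different algorithm).

-- ===== PORT A =====
def generate_seo_tags (title : String) : List String :=
  let tags := ["technology", "india", "tech-news", "innovation", "2025"]
  let title_lower := PySem.Str.lower title
  let tags := if ["ai", "artificial intelligence", "machine learning", "ml"].any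
      (fun k => PySem.Str.isIn k title_lower) then
    tags ++ ["ai", "artificial-intelligence", "machine-learning", "automation"] else tags
  let tags := if ["startup", "business", "entrepreneur", "company"].any
      (fun k => PySem.Str.isIn k title_lower) then
    tags ++ ["startup", "entrepreneurship", "business", "funding"] else tags
  let tags := if ["fintech", "finance", "banking", "payment"].any
      (fun k => PySem.Str.isIn k title_lower) then
    tags ++ ["fintech", "finance", "banking", "digital-payments"] else tags
  let tags := if ["mobile", "app", "android", "ios"].any
      (fun k => PySem.Str.isIn k title_lower) then
    tags ++ ["mobile-apps", "android", "ios", "mobile-development"] else tags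
  let tags := if ["blockchain", "crypto", "web3", "bitcoin"].any
      (fun k => PySem.Str.isIn k title_lower) then
    tags ++ ["blockchain", "cryptocurrency", "web3", "digital-currency"] else tags
  let tags := if ["cloud", "aws", "azure", "infrastructure"].any
      (fun k => PySem.Str.isIn k title_lower) then
    tags ++ ["cloud-computing", "infrastructure", "devops", "scalability"] else tags
  let tags := if ["development", "programming", "code", "developer"].any
      (fun k => PySem.Str.isIn k title_lower) then
    tags ++ ["software-development", "programming", "developer-tools", "coding"] else tags
  PySem.List.slice (PySem.List.dedup tags) none (some 10)

-- ===== PORT B =====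
def pvGroups : List (List String × List String) :=
  [ (["ai", "artificial intelligence", "machine learning", "ml"],
     ["ai", "artificial-intelligence", "machine-learning", "automation"]),
    (["startup", "business", "entrepreneur", "company"],
     ["startup", "entrepreneurship", "business", "funding"]),
    (["fintech", "finance", "banking", "payment"],
     ["fintech", "finance", "banking", "digital-payments"]),
    (["mobile", "app", "android", "ios"],
     ["mobile-apps", "android", "ios", "mobile-development"]),
    (["blockchain", "crypto", "web3", "bitcoin"],
     ["blockchain", "cryptocurrency", "web3", "digital-currency"]),
    (["cloud", "aws", "azure", "infrastructure"],
     ["cloud-computing", "infrastructure", "devops", "scalability"]),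
    (["development", "programming", "code", "developer"],
     ["software-development", "programming", "developer-tools", "coding"]) ]

-- Source B's budget loop with `break`, as structural recursion on the group list;
-- extra[:budget] with a nonnegative budget is List.take (exact here).
def pvFillBudget (title_lower : String) : List (List String × List String) → Nat → List String
  | [], _ => []
  | (keywords, extra) :: rest, budget =>
    if budget = 0 then []
    else if keywords.any (fun k => PySem.Str.isIn k title_lower) then
      let chunk := extra.take budget
      chunk ++ pvFillBudget title_lower rest (budget - chunk.length)
    else pvFillBudget title_lower rest budget

def generate_seo_tags_alt (title : String) : List String :=
  let title_lower := PySem.Str.lower title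
  ["technology", "india", "tech-news", "innovation", "2025"] ++
    pvFillBudget title_lower pvGroups 5

-- ===== PRECONDITION & SPEC =====
def Spec_generate_seo_tags (title : String) (out : List String) : Prop := out = generate_seo_tags_alt title
instance (title : String) (out : List String) : Decidable (Spec_generate_seo_tags title out) := by unfold Spec_generate_seo_tags; infer_instance

-- ===== CLAIM =====
def Claim_equal_generate_seo_tags : Prop := ∀ (title : String), Dom_generate_seo_tags title → Spec_generate_seo_tags title (generate_seo_tags title)

-- ===== LEMMAS AND PROOFS =====

-- ===== VERDICT =====
set_option maxHeartbeats 4000000 in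
theorem generate_seo_tags_spec : Claim_equal_generate_seo_tags := by
  intro title _
  unfold Spec_generate_seo_tags generate_seo_tags generate_seo_tags_alt pvGroups
  simp only [pvFillBudget]
  generalize (["ai", "artificial intelligence", "machine learning", "ml"].any
      (fun k => PySem.Str.isIn k (PySem.Str.lower title))) = b1
  generalize (["startup", "business", "entrepreneur", "company"].any
      (fun k => PySem.Str.isIn k (PySem.Str.lower title))) = b2
  generalize (["fintech", "finance", "banking", "payment"].any
      (fun k => PySem.Str.isIn k (PySem.Str.lower title))) = b3
  generalize (["mobile", "app", "android", "ios"].any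
      (fun k => PySem.Str.isIn k (PySem.Str.lower title))) = b4
  generalize (["blockchain", "crypto", "web3", "bitcoin"].any
      (fun k => PySem.Str.isIn k (PySem.Str.lower title))) = b5
  generalize (["cloud", "aws", "azure", "infrastructure"].any
      (fun k => PySem.Str.isIn k (PySem.Str.lower title))) = b6
  generalize (["development", "programming", "code", "developer"].any
      (fun k => PySem.Str.isIn k (PySem.Str.lower title))) = b7
  cases b1 <;> cases b2 <;> cases b3 <;> cases b4 <;> cases b5 <;> cases b6 <;> cases b7 <;> decide
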